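-- pv_equiv track=rewrite | github.com/NTU-ALComLab/elimssat | script/general05.py | rewrite_clause
-- ===== SOURCE A (Python) =====
-- def rewrite_clause(key, new_var, op, clauses):
--     neg_var = [-var for var in new_var]
--     neg_op = [1 - o for o in op]
--
--     new_clauses = []
--     for clause in clauses:
--         if key in clause:
--             c = gen2cnf(key, new_var, op, clause)
--             new_clauses += c
--         elif -key in clause:
--             c = gen2cnf(-key, neg_var, neg_op, clause)
--             new_clauses += c
--         else:
--             new_clauses.append(clause)
--
--     return new_clauses
--
-- def gen2cnf(key, new_var, ops, clause):
--     # convert general formula to cnf formula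
--     if len(new_var) != len(ops):
--         raise ValueError('Var and Op cannot match', len(new_var), len(ops))
--
--     clause.remove(key)
--     base_clause = [var for var in clause]
--
--     # reverse variables and ops
--     vars = [key] + new_var
--     # vars = vars[::-1]
--     # ops = ops[::-1]
--
--     clause = gen2cnf_rec(vars, ops, base_clause)
--
--     return clause
--
-- def gen2cnf_rec(vars, ops, clause):
--     if len(ops) == 0:
--         return [clause + vars]
--     if ops[0] == 0:
--         clause += [vars[0]]
--         new_clauses = gen2cnf_rec(vars[1:], ops[1:], clause)
--     elif ops[0] == 1:
--         c1 = clause + [vars[0]]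
--         c2 = gen2cnf_rec(vars[1:], ops[1:], clause)
--         new_clauses = [c1] + c2
--
--     return new_clauses
-- ===== SOURCE B (Python) =====
-- # B: iterative single pass replaces the recursive gen2cnf_rec; same in-place
-- # clause.remove side effect and ValueError as A; return value proved equal.
-- def rewrite_clause(key, new_var, op, clauses):
--     out = []
--     for clause in clauses:
--         if key in clause:
--             out.extend(_subst_cnf(key, new_var, op, clause))
--         elif -key in clause:
--             out.extend(_subst_cnf(-key, [-v for v in new_var], [1 - o for o in op], clause))
--         else:
--             out.append(clause)
--     return out
--
-- def _subst_cnf(k, sub, ops, clause):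
--     if len(sub) != len(ops):
--         raise ValueError('Var and Op cannot match', len(sub), len(ops))
--     clause.remove(k)  # same in-place side effect as the original
--     allvars = [k] + sub
--     current = list(clause)
--     done = []
--     for v, o in zip(allvars, ops):
--         if o == 1:
--             done.append(current + [v])
--         else:
--             current = current + [v]
--     done.append(current + [allvars[-1]])
--     return done
-- ===== Notes on version B (the rewrite author's own statement) =====
-- stated objective: alternative
-- what changed: The recursive gen2cnf_rec is replaced by a single iterative pass over zip([key]+new_var, op) that keeps a growing current clause and emits a finished clause at each op==1, appending current plus the last variable at the end; the in-place clause.remove and the ValueError are preserved.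
import Mathlib
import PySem

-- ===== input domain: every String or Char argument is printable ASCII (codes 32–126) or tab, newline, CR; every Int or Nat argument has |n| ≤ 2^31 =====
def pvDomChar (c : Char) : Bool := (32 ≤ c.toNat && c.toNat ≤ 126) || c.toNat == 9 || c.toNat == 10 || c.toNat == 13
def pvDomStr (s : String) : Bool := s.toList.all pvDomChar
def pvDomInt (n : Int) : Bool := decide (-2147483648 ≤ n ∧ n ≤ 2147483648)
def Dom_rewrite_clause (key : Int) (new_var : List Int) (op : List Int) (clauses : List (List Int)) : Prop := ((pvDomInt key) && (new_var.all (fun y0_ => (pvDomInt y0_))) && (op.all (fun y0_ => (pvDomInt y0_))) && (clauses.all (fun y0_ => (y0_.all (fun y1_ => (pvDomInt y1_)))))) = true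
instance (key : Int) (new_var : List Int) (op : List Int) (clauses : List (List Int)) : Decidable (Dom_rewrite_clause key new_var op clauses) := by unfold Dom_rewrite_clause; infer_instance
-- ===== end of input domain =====

-- B replaces the recursion gen2cnf_rec by one iterative zip pass (objective: alternative, not faster).
-- Both A and B mutate clauses containing ±key in place (clause.remove); the equivalence proved is about the return value.

-- ===== PORT A =====
def gen2cnf_rec (vars : List Int) (ops : List Int) (clause : List Int) : List (List Int) :=
  match ops, vars with
  | [], _ => [clause ++ vars]
  | o :: rest, v :: vs =>
    if o = 0 then gen2cnf_rec vs rest (clause ++ [v])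
    else if o = 1 then (clause ++ [v]) :: gen2cnf_rec vs rest clause
    else []  -- Python: UnboundLocalError here (excluded by Pre_)
  | _ :: _, [] => []  -- Python: IndexError (never reached from gen2cnf)

def gen2cnf (key : Int) (new_var : List Int) (ops : List Int) (clause : List Int) : List (List Int) :=
  if new_var.length ≠ ops.length then []  -- Python: ValueError here (excluded by Pre_)
  else match PySem.List.remove? clause key with
  | none => []  -- Python: ValueError from clause.remove (never reached: key ∈ clause at both call sites)
  | some base => gen2cnf_rec (key :: new_var) ops base

def rewrite_clause (key : Int) (new_var : List Int) (op : List Int) (clauses : List (List Int)) : List (List Int) :=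
  let neg_var := new_var.map (fun v => -v)
  let neg_op := op.map (fun o => 1 - o)
  clauses.foldl (fun acc clause =>
    if key ∈ clause then acc ++ gen2cnf key new_var op clause
    else if -key ∈ clause then acc ++ gen2cnf (-key) neg_var neg_op clause
    else acc ++ [clause]) []

-- ===== PORT B =====
def substLoop (pairs : List (Int × Int)) (st : List Int × List (List Int)) : List Int × List (List Int) :=
  pairs.foldl (fun st p => if p.2 = 1 then (st.1, st.2 ++ [st.1 ++ [p.1]]) else (st.1 ++ [p.1], st.2)) st

def subst_cnf (k : Int) (sub : List Int) (ops : List Int) (clause : List Int) : List (List Int) :=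
  if sub.length ≠ ops.length then []  -- Python: ValueError here (excluded by Pre_)
  else match PySem.List.remove? clause k with
  | none => []  -- Python: ValueError from clause.remove (never reached: k ∈ clause at both call sites)
  | some base =>
    let allvars := k :: sub
    let st := substLoop (allvars.zip ops) (base, [])
    st.2 ++ [st.1 ++ [allvars.getLastD 0]]  -- allvars[-1]; exact since allvars ≠ []

def rewrite_clause_alt (key : Int) (new_var : List Int) (op : List Int) (clauses : List (List Int)) : List (List Int) :=
  clauses.foldl (fun out clause =>
    if key ∈ clause then out ++ subst_cnf key new_var op clause
    else if -key ∈ clause then out ++ subst_cnf (-key) (new_var.map (fun v => -v)) (op.map (fun o => 1 - o)) clause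
    else out ++ [clause]) []

-- ===== PRECONDITION & SPEC =====
-- Pre_ excludes exactly the inputs where A raises: if some clause contains key or -key, A raises
-- ValueError unless len(new_var) = len(op) and UnboundLocalError unless every op is 0 or 1.
def Pre_rewrite_clause (key : Int) (new_var : List Int) (op : List Int) (clauses : List (List Int)) : Prop :=
  (new_var.length = op.length ∧ ∀ o ∈ op, o = 0 ∨ o = 1) ∨ (∀ c ∈ clauses, key ∉ c ∧ -key ∉ c)
instance (key : Int) (new_var : List Int) (op : List Int) (clauses : List (List Int)) : Decidable (Pre_rewrite_clause key new_var op clauses) := by unfold Pre_rewrite_clause; infer_instance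
def pvWitness_rewrite_clause : Int × List Int × List Int × List (List Int) := (1, [2, 3], [1, 0], [[1, 4], [5], [-1, 6]])

def Spec_rewrite_clause (key : Int) (new_var : List Int) (op : List Int) (clauses : List (List Int)) (out : List (List Int)) : Prop := out = rewrite_clause_alt key new_var op clauses
instance (key : Int) (new_var : List Int) (op : List Int) (clauses : List (List Int)) (out : List (List Int)) : Decidable (Spec_rewrite_clause key new_var op clauses out) := by unfold Spec_rewrite_clause; infer_instance

-- ===== CLAIM (what is proved, stated in full; the proofs are below) =====
def Claim_equal_rewrite_clause : Prop := ∀ (key : Int) (new_var : List Int) (op : List Int) (clauses : List (List Int)), Dom_rewrite_clause key new_var op clauses → Pre_rewrite_clause key new_var op clauses → Spec_rewrite_clause key new_var op clauses (rewrite_clause key new_var op clauses)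

-- ===== LEMMAS AND PROOFS =====
theorem rec_eq_loop : ∀ (ops vs cur : List Int) (res : List (List Int)),
    vs.length = ops.length + 1 → (∀ o ∈ ops, o = 0 ∨ o = 1) →
    res ++ gen2cnf_rec vs ops cur =
      (substLoop (vs.zip ops) (cur, res)).2 ++ [(substLoop (vs.zip ops) (cur, res)).1 ++ [vs.getLastD 0]] := by
  intro ops
  induction ops with
  | nil =>
    intro vs cur res hlen _
    match vs, hlen with
    | [v], _ => simp [gen2cnf_rec, substLoop]
  | cons o os ih =>
    intro vs cur res hlen hop
    match vs, hlen with
    | v :: w :: vs', hlen =>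
      have hlen' : (w :: vs').length = os.length + 1 := by simpa using hlen
      have hop' : ∀ x ∈ os, x = 0 ∨ x = 1 := fun x hx => hop x (List.mem_cons_of_mem _ hx)
      rcases hop o List.mem_cons_self with h0 | h1
      · subst h0
        have := ih (w :: vs') (cur ++ [v]) res hlen' hop'
        simpa [gen2cnf_rec, substLoop, List.foldl] using this
      · subst h1
        have := ih (w :: vs') cur (res ++ [cur ++ [v]]) hlen' hop'
        simpa [gen2cnf_rec, substLoop, List.foldl] using this

theorem gen2cnf_eq_subst (k : Int) (sub ops clause : List Int)
    (hop : ∀ o ∈ ops, o = 0 ∨ o = 1) : gen2cnf k sub ops clause = subst_cnf k sub ops clause := by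
  unfold gen2cnf subst_cnf
  by_cases h : sub.length ≠ ops.length
  · simp [h]
  · simp only [h, if_false]
    cases hr : PySem.List.remove? clause k with
    | none => rfl
    | some base =>
      have hlen : (k :: sub).length = ops.length + 1 := by simp at h ⊢; omega
      simpa using rec_eq_loop ops (k :: sub) base [] hlen hop

theorem rewrite_clause_spec : Claim_equal_rewrite_clause := by
  intro key new_var op clauses _ hpre
  unfold Spec_rewrite_clause rewrite_clause rewrite_clause_alt
  rcases hpre with ⟨_, hop⟩ | hno
  · have hop' : ∀ o ∈ op.map (fun o => 1 - o), o = 0 ∨ o = 1 := by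
      intro o ho
      simp only [List.mem_map] at ho
      rcases ho with ⟨x, hx, rfl⟩
      rcases hop x hx with h | h <;> simp [h]
    have h : ∀ (acc : List (List Int)), ∀ clause ∈ clauses,
        (if key ∈ clause then acc ++ gen2cnf key new_var op clause
         else if -key ∈ clause then acc ++ gen2cnf (-key) (new_var.map (fun v => -v)) (op.map (fun o => 1 - o)) clause
         else acc ++ [clause]) =
        (if key ∈ clause then acc ++ subst_cnf key new_var op clause
         else if -key ∈ clause then acc ++ subst_cnf (-key) (new_var.map (fun v => -v)) (op.map (fun o => 1 - o)) clause
         else acc ++ [clause]) := by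
      intro acc clause _
      by_cases h1 : key ∈ clause
      · simp [h1, gen2cnf_eq_subst _ _ _ _ hop]
      · by_cases h2 : -key ∈ clause
        · simp [h1, h2, gen2cnf_eq_subst _ _ _ _ hop']
        · simp [h1, h2]
    exact PySem.List.foldl_congr_mem _ _ _ _ h
  · have h : ∀ (acc : List (List Int)), ∀ clause ∈ clauses,
        (if key ∈ clause then acc ++ gen2cnf key new_var op clause
         else if -key ∈ clause then acc ++ gen2cnf (-key) (new_var.map (fun v => -v)) (op.map (fun o => 1 - o)) clause
         else acc ++ [clause]) =
        (if key ∈ clause then acc ++ subst_cnf key new_var op clause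
         else if -key ∈ clause then acc ++ subst_cnf (-key) (new_var.map (fun v => -v)) (op.map (fun o => 1 - o)) clause
         else acc ++ [clause]) := by
      intro acc clause hc
      rcases hno clause hc with ⟨h1, h2⟩
      simp [h1, h2]
    exact PySem.List.foldl_congr_mem _ _ _ _ h
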